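-- pv_equiv track=rewrite | github.com/Andrew-Stezenko/Python | Лабораторна робота №8/lb8 kod.py | f
-- ===== SOURCE A (Python) =====
-- def f(y,j):
--     m1=[]
--     for i in range(len(y)):
--         m1.append(y[i]-y[i-1])
--     m1.pop(0)
--     if j ==1:
--         return m1
--     else:
--         j-=1
--         return f(m1,j)
-- ===== SOURCE B (Python) =====
-- def f(y, j):
--     while True:
--         m1 = [y[i] - y[i - 1] for i in range(len(y))]
--         m1.pop(0)
--         if j == 1:
--             return m1
--         j -= 1
--         y = m1
-- ===== Notes on version B (the rewrite author's own statement) =====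
-- stated objective: alternative
-- what changed: A's recursion over j (each call building the difference row with an append loop) becomes a single while-True loop maintaining the current row, built by a list comprehension and trimmed of its wrap-around first entry with pop(0)
import Mathlib
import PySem

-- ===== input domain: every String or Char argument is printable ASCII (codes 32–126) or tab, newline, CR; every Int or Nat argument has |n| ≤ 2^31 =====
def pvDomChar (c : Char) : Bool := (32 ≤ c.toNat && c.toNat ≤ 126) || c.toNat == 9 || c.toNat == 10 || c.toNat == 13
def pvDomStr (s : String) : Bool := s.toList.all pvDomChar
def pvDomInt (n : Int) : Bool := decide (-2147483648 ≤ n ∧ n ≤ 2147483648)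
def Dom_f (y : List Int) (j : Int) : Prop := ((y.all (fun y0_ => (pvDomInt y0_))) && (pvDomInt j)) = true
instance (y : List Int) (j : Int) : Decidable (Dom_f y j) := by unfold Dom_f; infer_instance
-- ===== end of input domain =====

-- B turns A's recursion over j into an explicit while-True loop over the current difference
-- row, building each row by a list comprehension instead of an append loop (objective: alternative).

-- ===== PORT A =====
-- (length fact cited by both ports' termination proofs)
-- the append loop 'm1=[]; for i in range(len(y)): m1.append(y[i]-y[i-1])' (y[-1] wraps to the last element)
def fRow (y : List Int) : List Int :=
  (List.range y.length).foldl
    (fun m1 (i : Nat) => m1 ++ [PySem.List.pyGetD y (i : Int) 0 - PySem.List.pyGetD y ((i : Int) - 1) 0]) []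

lemma fRow_length (y : List Int) : (fRow y).length = y.length := by
  unfold fRow
  rw [PySem.List.foldl_append_singleton_eq_map]
  simp

def f (y : List Int) (j : Int) : List Int :=
  match h : fRow y with
  | [] => []                      -- m1.pop(0) on the empty list: IndexError (outside Pre_f)
  | _ :: m2 => if j == 1 then m2 else f m2 (j - 1)
termination_by y.length
decreasing_by
  have hl := congrArg List.length h
  rw [fRow_length] at hl
  simp at hl
  omega

-- ===== PORT B =====
-- the comprehension '[y[i] - y[i-1] for i in range(len(y))]'
def fAltRow (y : List Int) : List Int :=
  (List.range y.length).map
    (fun (i : Nat) => PySem.List.pyGetD y (i : Int) 0 - PySem.List.pyGetD y ((i : Int) - 1) 0)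

-- the 'while True' loop: state (y, j); 'm1.pop(0)' then return / update and continue
def f_alt (y : List Int) (j : Int) : List Int :=
  match h : PySem.List.pop? (fAltRow y) 0 with
  | none => []                    -- IndexError: pop from empty list (outside Pre_f)
  | some (_, m1) => if j == 1 then m1 else f_alt m1 (j - 1)
termination_by y.length
decreasing_by
  have hl : m1.length + 1 = (fAltRow y).length := PySem.List.length_of_pop?_eq_some _ h
  have hr : (fAltRow y).length = y.length := by simp [fAltRow]
  omega

-- ===== PRECONDITION & SPEC =====
-- Pre_f: exactly the inputs on which the Python A returns; for j < 1 or j > len(y) the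
-- recursion reaches m1.pop(0) on an empty row and raises IndexError (B's loop does the same).
def Pre_f (y : List Int) (j : Int) : Prop := 1 ≤ j ∧ j ≤ (y.length : Int)
instance (y : List Int) (j : Int) : Decidable (Pre_f y j) := by unfold Pre_f; infer_instance

def pvWitness_f : List Int × Int := ([3, 1, 4, 1, 5], 2)

def Spec_f (y : List Int) (j : Int) (out : List Int) : Prop := out = f_alt y j
instance (y : List Int) (j : Int) (out : List Int) : Decidable (Spec_f y j out) := by unfold Spec_f; infer_instance

-- ===== CLAIM (what is proved, stated in full; the proofs are below) =====
def Claim_equal_f : Prop := ∀ (y : List Int) (j : Int), Dom_f y j → Pre_f y j → Spec_f y j (f y j)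

-- ===== LEMMAS AND PROOFS =====

-- A's append-loop row and B's comprehension row are the same list
lemma row_eq (y : List Int) : fRow y = fAltRow y := by
  unfold fRow fAltRow
  rw [PySem.List.foldl_append_singleton_eq_map]
  simp

lemma fAltRow_length (y : List Int) : (fAltRow y).length = y.length := by
  simp [fAltRow]

lemma f_eq_f_alt : ∀ (n : Nat) (y : List Int) (j : Int), y.length = n → f y j = f_alt y j := by
  intro n
  induction n using Nat.strong_induction_on with
  | _ n ih =>
    intro y j hn
    rw [f, f_alt]
    cases hr : fAltRow y with
    | nil =>
        split
        · simp [PySem.List.pop?, PySem.List.pyIdx?]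
        · rename_i hd m2 h
          rw [row_eq, hr] at h
          exact absurd h (by simp)
    | cons x xs =>
        have hx : (fRow y) = x :: xs := by rw [row_eq, hr]
        have hlen : xs.length + 1 = y.length := by
          have := congrArg List.length hr
          rw [fAltRow_length] at this
          simpa using this.symm
        split
        · rename_i h
          rw [hx] at h
          exact absurd h (by simp)
        · rename_i hd m2 h
          rw [hx] at h
          obtain ⟨rfl, rfl⟩ : x = hd ∧ xs = m2 := by
            constructor <;> injection h
          split
          · split
            · rename_i hnone
              rw [PySem.List.pop?_zero_cons] at hnone
              exact absurd hnone (by simp)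
            · rename_i fst m1 hsome
              rw [PySem.List.pop?_zero_cons] at hsome
              simp only [Option.some.injEq, Prod.mk.injEq] at hsome
              exact hsome.2
          · split
            · rename_i hj hnone
              rw [PySem.List.pop?_zero_cons] at hnone
              exact absurd hnone (by simp)
            · rename_i hj fst m1 hsome
              rw [PySem.List.pop?_zero_cons] at hsome
              simp only [Option.some.injEq, Prod.mk.injEq] at hsome
              rw [← hsome.2]
              exact ih xs.length (by omega) xs (j - 1) rfl

-- ===== VERDICT (by name: the statement is the Claim_ definition above) =====
theorem f_spec : Claim_equal_f := by
  intro y j _ _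
  unfold Spec_f
  exact f_eq_f_alt y.length y j rfl
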